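-- pv_equiv track=rewrite | github.com/SIC98/image-captioning-Pytorch | utils.py | encode_texts_2d
-- ===== SOURCE A (Python) =====
-- def encode_texts_2d(texts_2d, word_map):
--     # Flatten the list of lists and encode texts
--     texts_2d = [list(t) for t in zip(*texts_2d)]
--     encoded_texts = [encode_texts(texts, word_map)[0] for texts in texts_2d]
--
--     # Finding the maximum length
--     max_len = max(len(text) for sublist in encoded_texts for text in sublist)
--
--     # Padding
--     for sublist in encoded_texts:
--         for text in sublist:
--             if len(text) < max_len:
--                 text += [word_map['<pad>']] * (max_len - len(text))
--
--     return encoded_texts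
--
-- def encode_texts(texts, word_map):
--     # Encoding texts
--     encoded_texts = [encode_text(text, word_map) for text in texts]
--
--     # Finding the maximum length
--     texts_length = [len(text) for text in encoded_texts]
--     max_len = max(texts_length)
--
--     # Padding
--     for text in encoded_texts:
--         if len(text) < max_len:
--             text += [word_map['<pad>']] * (max_len - len(text))
--
--     texts_length = [[text_length] for text_length in texts_length]
--
--     return encoded_texts, texts_length
--
-- def encode_text(text, word_map):
--     words = text.split()
--
--     # Adding "<start>" and "<end>" tokens and encoding the words
--     words_encoded = [word_map.get(
--         word, word_map['<unk>']) for word in words]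
--
--     words_encoded = [word_map['<start>']] + \
--         words_encoded + [word_map['<end>']]
--
--     return words_encoded
-- ===== SOURCE B (Python) =====
-- def encode_texts_2d(texts_2d, word_map):
--     cols = [[t.split() for t in col] for col in zip(*texts_2d)]
--     max_words = max(len(ws) for col in cols for ws in col)
--     return [[_encode_padded(ws, word_map, max_words) for ws in col] for col in cols]
--
-- def _encode_padded(words, word_map, max_words):
--     encoded = [word_map['<start>']]
--     encoded.extend(word_map.get(w, word_map['<unk>']) for w in words)
--     encoded.append(word_map['<end>'])
--     if len(words) < max_words:
--         encoded.extend([word_map['<pad>']] * (max_words - len(words)))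
--     return encoded
-- ===== Notes on version B (the rewrite author's own statement) =====
-- stated objective: simpler
-- what changed: B drops A's per-column encode_texts pass (local max, local padding, unused lengths list) entirely: it splits each text once, takes one global word-count maximum over the transpose, and builds each padded encoding in a single construction pass instead of A's pad-to-column-max-then-re-pad-to-global-max double pass with list mutation.
import Mathlib
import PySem

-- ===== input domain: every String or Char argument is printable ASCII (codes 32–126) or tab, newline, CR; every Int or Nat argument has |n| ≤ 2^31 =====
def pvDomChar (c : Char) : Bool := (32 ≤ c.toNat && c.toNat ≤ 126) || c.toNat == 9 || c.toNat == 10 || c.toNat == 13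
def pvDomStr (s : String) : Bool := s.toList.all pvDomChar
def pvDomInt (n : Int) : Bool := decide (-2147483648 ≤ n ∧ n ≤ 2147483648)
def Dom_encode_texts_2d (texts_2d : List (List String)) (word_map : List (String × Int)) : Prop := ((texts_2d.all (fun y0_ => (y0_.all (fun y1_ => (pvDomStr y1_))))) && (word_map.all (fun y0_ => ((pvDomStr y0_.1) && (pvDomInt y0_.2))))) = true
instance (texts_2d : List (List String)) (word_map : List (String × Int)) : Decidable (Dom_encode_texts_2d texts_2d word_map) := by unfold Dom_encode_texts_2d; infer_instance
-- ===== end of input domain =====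

-- B replaces A's two-stage padding (per-column, then global) by computing the global word maximum
-- once and building each padded encoding directly in a single construction pass (objective: simpler).
-- Equivalence is over the RETURN value; A mutates the inner lists it builds (not its arguments).

-- shared dict primitive: word_map[k] / word_map.get(k, d) on an association list (first match)
def pvGet? (wm : List (String × Int)) (k : String) : Option Int :=
  (wm.find? (fun p => p.1 == k)).map (·.2)

-- word_map[k]; the default 0 is never what A returns: Pre_ guarantees the key is present wherever it is read
def pvGetK (wm : List (String × Int)) (k : String) : Int := (pvGet? wm k).getD 0

-- zip(*rows): columns up to the shortest row
def pvMinLen (rows : List (List String)) : Nat :=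
  match rows with
  | [] => 0
  | r :: rs => rs.foldl (fun m x => min m x.length) r.length

def pvZipT (rows : List (List String)) : List (List String) :=
  (List.range (pvMinLen rows)).map (fun j => rows.map (fun r => r.getD j ""))

-- ===== PORT A =====
def pvA_encode_text (text : String) (wm : List (String × Int)) : List Int :=
  let words := PySem.Str.split₀ text
  let words_encoded := words.map (fun w => (pvGet? wm w).getD (pvGetK wm "<unk>"))
  [pvGetK wm "<start>"] ++ words_encoded ++ [pvGetK wm "<end>"]

-- 'text += [pad] * (max_len - len(text))' guarded by 'len(text) < max_len' (used twice by A)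
def pvPad (t : List Int) (maxLen : Nat) (p : Int) : List Int :=
  if t.length < maxLen then t ++ List.replicate (maxLen - t.length) p else t

def pvA_encode_texts (texts : List String) (wm : List (String × Int)) :
    List (List Int) × List (List Int) :=
  let encoded := texts.map (fun t => pvA_encode_text t wm)
  let lens := encoded.map List.length
  let maxLen := lens.foldl max 0      -- max(texts_length); Pre_ excludes the empty list Python raises on
  let padded := encoded.map (fun t => pvPad t maxLen (pvGetK wm "<pad>"))
  (padded, lens.map (fun l => [(l : Int)]))

def encode_texts_2d (texts_2d : List (List String)) (word_map : List (String × Int)) :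
    List (List (List Int)) :=
  let cols := pvZipT texts_2d
  let encoded := cols.map (fun texts => (pvA_encode_texts texts word_map).1)
  let maxLen := (encoded.flatMap (fun sub => sub.map List.length)).foldl max 0   -- Pre_ excludes the empty case Python raises on
  encoded.map (fun sub => sub.map (fun t => pvPad t maxLen (pvGetK word_map "<pad>")))

-- ===== PORT B =====
def pvB_encode_padded (words : List String) (wm : List (String × Int)) (maxW : Nat) : List Int :=
  let encoded := [pvGetK wm "<start>"]
    ++ words.map (fun w => (pvGet? wm w).getD (pvGetK wm "<unk>"))
    ++ [pvGetK wm "<end>"]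
  if words.length < maxW then
    encoded ++ List.replicate (maxW - words.length) (pvGetK wm "<pad>")
  else encoded

def encode_texts_2d_alt (texts_2d : List (List String)) (word_map : List (String × Int)) :
    List (List (List Int)) :=
  let cols := (pvZipT texts_2d).map (fun col => col.map PySem.Str.split₀)
  let maxW := (cols.flatMap (fun col => col.map List.length)).foldl max 0
  cols.map (fun col => col.map (fun ws => pvB_encode_padded ws word_map maxW))

-- ===== PRECONDITION & SPEC =====
def pvHasKey (wm : List (String × Int)) (k : String) : Bool := wm.any (fun p => p.1 == k)

-- Pre_ is exactly where the Python A returns: a nonempty transpose (else max() raises ValueError),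
-- the always-read '<start>'/'<end>' keys, '<unk>' as soon as any used text has a word (Python's
-- dict.get evaluates its default eagerly), and '<pad>' unless every used text has the same word count.
def Pre_encode_texts_2d (texts_2d : List (List String)) (word_map : List (String × Int)) : Prop :=
  0 < pvMinLen texts_2d ∧
  pvHasKey word_map "<start>" = true ∧
  pvHasKey word_map "<end>" = true ∧
  (pvHasKey word_map "<unk>" = true ∨
    ∀ r ∈ texts_2d, ∀ j < pvMinLen texts_2d, PySem.Str.split₀ (r.getD j "") = []) ∧
  (pvHasKey word_map "<pad>" = true ∨
    ∀ r ∈ texts_2d, ∀ j < pvMinLen texts_2d,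
      (PySem.Str.split₀ (r.getD j "")).length
        = (PySem.Str.split₀ ((texts_2d.headD []).getD 0 "")).length)

instance (texts_2d : List (List String)) (word_map : List (String × Int)) : Decidable (Pre_encode_texts_2d texts_2d word_map) := by unfold Pre_encode_texts_2d; infer_instance

def pvWitness_encode_texts_2d : List (List String) × (List (String × Int)) :=
  ([["a b", "c"]], [("<start>", 1), ("<end>", 2), ("<unk>", 3), ("<pad>", 4), ("a", 5)])

def Spec_encode_texts_2d (texts_2d : List (List String)) (word_map : List (String × Int)) (out : List (List (List Int))) : Prop := out = encode_texts_2d_alt texts_2d word_map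
instance (texts_2d : List (List String)) (word_map : List (String × Int)) (out : List (List (List Int))) : Decidable (Spec_encode_texts_2d texts_2d word_map out) := by unfold Spec_encode_texts_2d; infer_instance

-- ===== CLAIM (what is proved, stated in full; the proofs are below) =====
def Claim_equal_encode_texts_2d : Prop := ∀ (texts_2d : List (List String)) (word_map : List (String × Int)), Dom_encode_texts_2d texts_2d word_map → Pre_encode_texts_2d texts_2d word_map → Spec_encode_texts_2d texts_2d word_map (encode_texts_2d texts_2d word_map)

-- ===== LEMMAS AND PROOFS =====

-- word count of a text, per-column and global running maxima (proof-side shorthands)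
def pvL (t : String) : Nat := (PySem.Str.split₀ t).length
def pvWcm (c : List String) : Nat := (c.map pvL).foldl max 0
def pvGw (cols : List (List String)) : Nat := (cols.flatMap (fun c => c.map pvL)).foldl max 0

theorem fmax_init (l : List Nat) : ∀ a, l.foldl max a = max a (l.foldl max 0) := by
  induction l with
  | nil => simp
  | cons x t ih => intro a; simp only [List.foldl_cons]; rw [ih (max a x), ih (max 0 x)]; omega

theorem fmax_append (l1 l2 : List Nat) :
    (l1 ++ l2).foldl max 0 = max (l1.foldl max 0) (l2.foldl max 0) := by
  rw [List.foldl_append, fmax_init]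

theorem fmax_shift' (l : List Nat) : ∀ a, (l.map (· + 2)).foldl max (a + 2) = l.foldl max a + 2 := by
  induction l with
  | nil => simp
  | cons x t ih =>
    intro a; simp only [List.map_cons, List.foldl_cons]
    have h : max (a + 2) (x + 2) = max a x + 2 := by omega
    rw [h, ih]

theorem fmax_shift (l : List Nat) (hl : l ≠ []) :
    (l.map (· + 2)).foldl max 0 = l.foldl max 0 + 2 := by
  rcases l with _ | ⟨x, t⟩
  · simp at hl
  · simp only [List.map_cons, List.foldl_cons, Nat.zero_max]
    rw [fmax_shift' t x]

theorem fmax_replicate (n : Nat) (hn : n ≠ 0) (v : Nat) :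
    (List.replicate n v).foldl max 0 = v := by
  induction n with
  | zero => simp at hn
  | succ k ih =>
    rcases Nat.eq_zero_or_pos k with hk | hk
    · subst hk; simp
    · rw [List.replicate_succ, List.foldl_cons, fmax_init, ih (by omega)]; omega

theorem le_fmax (l : List Nat) (x : Nat) (hx : x ∈ l) : x ≤ l.foldl max 0 :=
  (PySem.List.le_foldl_max l 0).2 x hx

theorem fmax_le (l : List Nat) (g : Nat) (h : ∀ x ∈ l, x ≤ g) : l.foldl max 0 ≤ g := by
  rcases PySem.List.foldl_max_mem l 0 with h0 | hm
  · omega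
  · exact h _ hm

theorem len_encA (t : String) (wm : List (String × Int)) :
    (pvA_encode_text t wm).length = pvL t + 2 := by
  simp [pvA_encode_text, pvL]

theorem len_pvPad (t : List Int) (M : Nat) (p : Int) (h : t.length ≤ M) :
    (pvPad t M p).length = M := by
  unfold pvPad; split_ifs with h2
  · simp only [List.length_append, List.length_replicate]; omega
  · omega

theorem pvPad_pvPad (t : List Int) (c M : Nat) (p : Int) (h1 : t.length ≤ c) (h2 : c ≤ M) :
    pvPad (pvPad t c p) M p = pvPad t M p := by
  by_cases hc : t.length < c
  · have hpc : pvPad t c p = t ++ List.replicate (c - t.length) p := by simp [pvPad, hc]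
    have hlc : (t ++ List.replicate (c - t.length) p).length = c := by
      simp only [List.length_append, List.length_replicate]; omega
    rw [hpc]
    unfold pvPad
    rw [hlc]
    split_ifs with hA hB hB
    · rw [List.append_assoc, ← List.replicate_add]
      have hcnt : c - t.length + (M - c) = M - t.length := by omega
      rw [hcnt]
    · exact absurd (by omega) hB
    · have hcM : c = M := by omega
      subst hcM; rfl
    · exact absurd (by omega) hB
  · have hpc : pvPad t c p = t := by simp [pvPad, hc]
    rw [hpc]

theorem B_elem (ws : List String) (wm : List (String × Int)) (maxW : Nat) :
    pvB_encode_padded ws wm maxW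
      = pvPad ([pvGetK wm "<start>"]
          ++ ws.map (fun w => (pvGet? wm w).getD (pvGetK wm "<unk>"))
          ++ [pvGetK wm "<end>"]) (maxW + 2) (pvGetK wm "<pad>") := by
  unfold pvB_encode_padded pvPad
  have hlen : ([pvGetK wm "<start>"]
      ++ ws.map (fun w => (pvGet? wm w).getD (pvGetK wm "<unk>"))
      ++ [pvGetK wm "<end>"]).length = ws.length + 2 := by simp
  rw [hlen]
  split_ifs with h1 h2 h2
  · have hcnt : maxW - ws.length = maxW + 2 - (ws.length + 2) := by omega
    rw [hcnt]
  · exact absurd (by omega) h2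
  · exact absurd (by omega) h1
  · rfl

theorem A_col (texts : List String) (wm : List (String × Int)) (h : texts ≠ []) :
    (pvA_encode_texts texts wm).1
      = texts.map (fun t => pvPad (pvA_encode_text t wm) (pvWcm texts + 2) (pvGetK wm "<pad>")) := by
  unfold pvA_encode_texts
  simp only [List.map_map]
  have hlens : texts.map (fun t => (pvA_encode_text t wm).length)
      = (texts.map pvL).map (· + 2) := by
    simp only [List.map_map]; exact List.map_congr_left (fun t _ => len_encA t wm)
  have hmax : (texts.map (fun t => (pvA_encode_text t wm).length)).foldl max 0 = pvWcm texts + 2 := by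
    rw [hlens, fmax_shift _ (by simpa using h)]; rfl
  simp only [Function.comp_def] at hmax ⊢
  rw [hmax]

theorem lens_A_col (texts : List String) (wm : List (String × Int)) (h : texts ≠ []) :
    ((pvA_encode_texts texts wm).1).map List.length
      = List.replicate texts.length (pvWcm texts + 2) := by
  rw [A_col texts wm h, List.map_map]
  refine List.eq_replicate_iff.mpr ⟨by simp, ?_⟩
  intro x hx
  rcases List.mem_map.mp hx with ⟨t, ht, rfl⟩
  simp only [Function.comp_apply]
  apply len_pvPad
  rw [len_encA]
  have : pvL t ≤ pvWcm texts := le_fmax _ _ (List.mem_map_of_mem ht)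
  omega

theorem wcm_le_gw (cols : List (List String)) (c : List String) (hc : c ∈ cols) :
    pvWcm c ≤ pvGw cols := by
  apply fmax_le
  intro x hx
  exact le_fmax _ _ (List.mem_flatMap.mpr ⟨c, hc, hx⟩)

theorem M_eq_gw (cols : List (List String)) (h0 : cols ≠ []) (hne : ∀ c ∈ cols, c ≠ []) :
    (cols.flatMap (fun c => List.replicate c.length (pvWcm c + 2))).foldl max 0 = pvGw cols + 2 := by
  induction cols with
  | nil => simp at h0
  | cons c cs ih =>
    have hcne : c ≠ [] := hne c (by simp)
    have hrep : (List.replicate c.length (pvWcm c + 2)).foldl max 0 = pvWcm c + 2 :=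
      fmax_replicate _ (by simpa using hcne) _
    rcases eq_or_ne cs [] with rfl | hcs
    · simp only [List.flatMap_cons, List.flatMap_nil, List.append_nil]
      rw [hrep]
      have hg : pvGw [c] = pvWcm c := by
        unfold pvGw pvWcm
        simp
      rw [hg]
    · have ihcs := ih hcs (fun x hx => hne x (by simp [hx]))
      simp only [List.flatMap_cons]
      rw [fmax_append, hrep, ihcs]
      have hg : pvGw (c :: cs) = max (pvWcm c) (pvGw cs) := by
        unfold pvGw pvWcm
        simp only [List.flatMap_cons]
        rw [fmax_append]
      rw [hg]
      omega

theorem mem_pvZipT_ne_nil (rows : List (List String)) (c : List String) (hc : c ∈ pvZipT rows) :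
    c ≠ [] := by
  unfold pvZipT at hc
  rcases List.mem_map.mp hc with ⟨j, hj, rfl⟩
  rcases rows with _ | ⟨r, rs⟩
  · simp [pvMinLen] at hj
  · simp

theorem ports_eq (texts_2d : List (List String)) (word_map : List (String × Int)) :
    encode_texts_2d texts_2d word_map = encode_texts_2d_alt texts_2d word_map := by
  simp only [encode_texts_2d, encode_texts_2d_alt]
  rcases eq_or_ne (pvZipT texts_2d) [] with hz | hz
  · simp [hz]
  · set cols := pvZipT texts_2d with hcols
    have hne : ∀ c ∈ cols, c ≠ [] := fun c hc => mem_pvZipT_ne_nil texts_2d c hc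
    -- A's global maximum equals the global word maximum plus 2
    have hflat : (cols.map (fun texts => (pvA_encode_texts texts word_map).1)).flatMap
          (fun sub => sub.map List.length)
        = cols.flatMap (fun c => List.replicate c.length (pvWcm c + 2)) := by
      rw [List.flatMap_map]
      exact List.flatMap_congr (fun c hc => lens_A_col c word_map (hne c hc))
    have hM : ((cols.map (fun texts => (pvA_encode_texts texts word_map).1)).flatMap
          (fun sub => sub.map List.length)).foldl max 0 = pvGw cols + 2 := by
      rw [hflat]; exact M_eq_gw cols hz hne
    have hW : ((cols.map (fun col => col.map PySem.Str.split₀)).flatMap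
          (fun col => col.map List.length)).foldl max 0 = pvGw cols := by
      rw [List.flatMap_map]
      unfold pvGw
      congr 1
      exact List.flatMap_congr (fun c _ => by rw [List.map_map]; rfl)
    rw [hM, hW]
    simp only [List.map_map]
    apply List.map_congr_left
    intro c hc
    simp only [Function.comp_apply]
    rw [A_col c word_map (hne c hc)]
    simp only [List.map_map]
    apply List.map_congr_left
    intro t ht
    simp only [Function.comp_apply]
    rw [B_elem]
    have h1 : (pvA_encode_text t word_map).length ≤ pvWcm c + 2 := by
      rw [len_encA]
      have hw : pvL t ≤ pvWcm c := by
        unfold pvWcm; exact le_fmax _ _ (List.mem_map_of_mem ht)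
      omega
    have h2 : pvWcm c + 2 ≤ pvGw cols + 2 := by
      have := wcm_le_gw cols c hc
      omega
    rw [pvPad_pvPad _ _ _ _ h1 h2]
    rfl

-- ===== VERDICT (by name: the statement is the Claim_ definition above) =====
theorem encode_texts_2d_spec : Claim_equal_encode_texts_2d := by
  intro texts_2d word_map _ _
  unfold Spec_encode_texts_2d
  exact ports_eq texts_2d word_map
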